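-- pv_equiv track=rewrite | github.com/vikepk/py_practice | problems/27randomDir.py | destination
-- ===== SOURCE A (Python) =====
-- def destination(moves,origin):
--     des=origin.copy()
--     for m in moves:
--         if m[0]=='R':
--             des[1]+=m[1]
--         elif m[0]=='L':
--             des[1]-=m[1]
--         elif m[0]=='U':
--             des[0]+=m[1]
--         elif m[0]=='D':
--             des[0]-=m[1]
--     return des
-- ===== SOURCE B (Python) =====
-- def destination(moves, origin):
--     des = origin.copy()
--     des[0] += sum(v for d, v in moves if d == 'U') - sum(v for d, v in moves if d == 'D')
--     des[1] += sum(v for d, v in moves if d == 'R') - sum(v for d, v in moves if d == 'L')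
--     return des
-- ===== Notes on version B (the rewrite author's own statement) =====
-- stated objective: simpler
-- what changed: Replaces the interleaved branching loop with two per-axis updates built from filtered sums over moves; Pre_ excludes origins shorter than 2, where B itself raises IndexError (A only returns there when no move touches the missing index).
-- outside the precondition, e.g. on destination([], []): A returns [], B raises IndexError; on destination([('U', 1)], [5]): A returns [6], B raises IndexError
import Mathlib
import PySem

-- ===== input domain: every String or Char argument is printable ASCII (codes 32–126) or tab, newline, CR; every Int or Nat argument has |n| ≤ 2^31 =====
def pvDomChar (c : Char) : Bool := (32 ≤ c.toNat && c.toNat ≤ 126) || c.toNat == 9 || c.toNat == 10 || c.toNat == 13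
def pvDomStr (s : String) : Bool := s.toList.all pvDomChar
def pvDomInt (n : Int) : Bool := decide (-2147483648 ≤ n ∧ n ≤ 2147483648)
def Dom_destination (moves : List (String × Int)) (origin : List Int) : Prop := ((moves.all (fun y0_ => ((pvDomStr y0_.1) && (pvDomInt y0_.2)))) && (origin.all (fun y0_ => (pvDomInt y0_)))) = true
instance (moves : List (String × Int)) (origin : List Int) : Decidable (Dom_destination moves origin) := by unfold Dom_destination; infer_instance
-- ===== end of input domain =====

-- B replaces A's interleaved branching loop with two per-axis updates built from
-- filtered sums; equivalence is about the return value (neither mutates origin, A copies it).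

-- ===== PORT A =====
-- des[1] += m[1] raises IndexError when the index is out of range; Pre_ excludes exactly
-- origins of length < 2, so getD/set here is exact wherever the claim applies.
def destination (moves : List (String × Int)) (origin : List Int) : List Int :=
  moves.foldl (fun des m =>
    if m.1 = "R" then des.set 1 (des.getD 1 0 + m.2)
    else if m.1 = "L" then des.set 1 (des.getD 1 0 - m.2)
    else if m.1 = "U" then des.set 0 (des.getD 0 0 + m.2)
    else if m.1 = "D" then des.set 0 (des.getD 0 0 - m.2)
    else des) origin

-- ===== PORT B =====
-- sum(v for d, v in moves if d == c)
def sumDir (moves : List (String × Int)) (c : String) : Int :=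
  ((moves.filter (fun m => m.1 = c)).map Prod.snd).sum

-- des = origin.copy(); des[0] += …; des[1] += …; return des
-- (des[i] += v is exact via set/getD: Pre_ guarantees indices 0 and 1 are in range)
def destination_alt (moves : List (String × Int)) (origin : List Int) : List Int :=
  let des := origin
  let des := des.set 0 (des.getD 0 0 + (sumDir moves "U" - sumDir moves "D"))
  des.set 1 (des.getD 1 0 + (sumDir moves "R" - sumDir moves "L"))

-- ===== PRECONDITION & SPEC =====
-- Pre_ excludes origins with fewer than 2 elements: there B itself raises IndexError
-- unconditionally, while A raises whenever some move's direction letter needs the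
-- missing index (and returns only when no move touches it).
def Pre_destination (moves : List (String × Int)) (origin : List Int) : Prop :=
  2 ≤ origin.length
instance (moves : List (String × Int)) (origin : List Int) : Decidable (Pre_destination moves origin) := by unfold Pre_destination; infer_instance

def pvWitness_destination : (List (String × Int)) × List Int := ([("R", 3), ("U", 1), ("x", 7)], [0, 0])

def Spec_destination (moves : List (String × Int)) (origin : List Int) (out : List Int) : Prop := out = destination_alt moves origin
instance (moves : List (String × Int)) (origin : List Int) (out : List Int) : Decidable (Spec_destination moves origin out) := by unfold Spec_destination; infer_instance

-- ===== CLAIM =====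
def Claim_equal_destination : Prop := ∀ (moves : List (String × Int)) (origin : List Int), Dom_destination moves origin → Pre_destination moves origin → Spec_destination moves origin (destination moves origin)

-- ===== LEMMAS AND PROOFS =====

theorem sumDir_cons (m : String × Int) (ms : List (String × Int)) (c : String) :
    sumDir (m :: ms) c = (if m.1 = c then m.2 else 0) + sumDir ms c := by
  by_cases h : m.1 = c <;> simp [sumDir, h]

theorem destination_cons (m : String × Int) (ms : List (String × Int)) (des : List Int) :
    destination (m :: ms) des = destination ms
      (if m.1 = "R" then des.set 1 (des.getD 1 0 + m.2)
       else if m.1 = "L" then des.set 1 (des.getD 1 0 - m.2)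
       else if m.1 = "U" then des.set 0 (des.getD 0 0 + m.2)
       else if m.1 = "D" then des.set 0 (des.getD 0 0 - m.2)
       else des) := by
  simp [destination]

theorem destination_key (moves : List (String × Int)) (a b : Int) (t : List Int) :
    destination moves (a :: b :: t) =
      (a + (sumDir moves "U" - sumDir moves "D")) ::
      (b + (sumDir moves "R" - sumDir moves "L")) :: t := by
  induction moves generalizing a b with
  | nil => simp [destination, sumDir]
  | cons m ms ih =>
    rw [destination_cons]
    by_cases hR : m.1 = "R"
    · rw [if_pos hR]
      rw [show ((a::b::t).set 1 ((a::b::t).getD 1 0 + m.2)) = a::(b+m.2)::t from rfl, ih]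
      simp [sumDir_cons, hR]; ring
    · by_cases hL : m.1 = "L"
      · rw [if_neg hR, if_pos hL]
        rw [show ((a::b::t).set 1 ((a::b::t).getD 1 0 - m.2)) = a::(b-m.2)::t from rfl, ih]
        simp [sumDir_cons, hL]; ring
      · by_cases hU : m.1 = "U"
        · rw [if_neg hR, if_neg hL, if_pos hU]
          rw [show ((a::b::t).set 0 ((a::b::t).getD 0 0 + m.2)) = (a+m.2)::b::t from rfl, ih]
          simp [sumDir_cons, hU]; ring
        · by_cases hD : m.1 = "D"
          · rw [if_neg hR, if_neg hL, if_neg hU, if_pos hD]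
            rw [show ((a::b::t).set 0 ((a::b::t).getD 0 0 - m.2)) = (a-m.2)::b::t from rfl, ih]
            simp [sumDir_cons, hD]; ring
          · rw [if_neg hR, if_neg hL, if_neg hU, if_neg hD, ih]
            simp [sumDir_cons, hR, hL, hU, hD]

-- ===== VERDICT =====
theorem destination_spec : Claim_equal_destination := by
  intro moves origin _ hpre
  show destination moves origin = destination_alt moves origin
  rcases origin with _ | ⟨a, _ | ⟨b, t⟩⟩
  · simp [Pre_destination] at hpre
  · simp [Pre_destination] at hpre
  · rw [destination_key]
    rfl
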